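-- pv_equiv track=rewrite | github.com/msa455/msa455.github.io | nlp/code/util.py | initialize_trio
-- ===== SOURCE A (Python) =====
-- def initialize_trio(a, b):
--     x = {}
--     for i in range(len(a)):
--         ee = a[i]
--         ff = b[i]
--         l_e = len(ee)
--         l_f = len(ff)
--         for (j, E) in enumerate(ee, 1):
--             if j not in x:
--                 x[j] = {}
--             if l_e not in x[j]:
--                 x[j][l_e] = {}
--             x[j][l_e][l_f] = 0
--     return x
-- ===== SOURCE B (Python) =====
-- def initialize_trio(a, b):
--     # Pass 1: reduce each sentence pair to its pair of lengths.
--     pairs = []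
--     for i in range(len(a)):
--         pairs.append((len(a[i]), len(b[i])))
--     # Pass 2: build the result by position j, transposing the loops.
--     m = max((le for le, _ in pairs), default=0)
--     x = {}
--     for j in range(1, m + 1):
--         inner = {}
--         for (le, lf) in pairs:
--             if le >= j:
--                 if le not in inner:
--                     inner[le] = {}
--                 inner[le][lf] = 0
--         x[j] = inner
--     return x
-- ===== Notes on version B (the rewrite author's own statement) =====
-- stated objective: alternative
-- what changed: Instead of scattering x[j][l_e][l_f]=0 per character position inside each sentence, B first reduces the corpus to one list of (len(e),len(f)) pairs, takes the maximum source length m, and then builds the result position-by-position (for j in 1..m) from that pair list - a transposed, index-then-rebuild decomposition.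
-- outside the precondition, e.g. on initialize_trio(['ab'], []): A raises IndexError, B raises IndexError
import Mathlib
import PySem

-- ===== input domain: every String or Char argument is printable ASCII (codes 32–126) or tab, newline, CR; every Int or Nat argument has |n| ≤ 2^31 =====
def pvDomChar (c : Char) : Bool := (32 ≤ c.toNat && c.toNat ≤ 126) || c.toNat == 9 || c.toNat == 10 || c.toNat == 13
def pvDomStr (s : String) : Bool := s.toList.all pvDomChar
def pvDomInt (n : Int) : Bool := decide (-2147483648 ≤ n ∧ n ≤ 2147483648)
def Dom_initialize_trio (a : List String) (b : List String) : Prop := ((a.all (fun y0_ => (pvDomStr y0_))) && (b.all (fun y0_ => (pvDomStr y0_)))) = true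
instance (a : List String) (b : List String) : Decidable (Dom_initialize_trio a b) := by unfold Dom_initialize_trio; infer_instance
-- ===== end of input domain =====

-- B builds the same nested zero table by a transposed decomposition: one pass collects the
-- (len(e), len(f)) pairs, then the result is assembled position-by-position from that list.

-- ===== PORT A =====
def initialize_trio (a : List String) (b : List String) : List (Int × List (Int × List (Int × Int))) :=
  let x : PySem.Dict Int (PySem.Dict Int (PySem.Dict Int Int)) :=
    (PySem.List.pyRange 0 (a.length : Int)).foldl (fun x i =>
      let ee := PySem.List.pyGetD a i ""
      let ff := PySem.List.pyGetD b i ""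
      let l_e := PySem.Str.len ee
      let l_f := PySem.Str.len ff
      (PySem.List.enumerate ee.toList 1).foldl (fun x jE =>
        let j := jE.1
        let x := if x.contains j then x else x.insert j PySem.Dict.empty
        let d1 := x.getD j PySem.Dict.empty
        let d1 := if d1.contains l_e then d1 else d1.insert l_e PySem.Dict.empty
        x.insert j (d1.insert l_e ((d1.getD l_e PySem.Dict.empty).insert l_f 0))) x)
      PySem.Dict.empty
  x.items.map (fun p => (p.1, p.2.items.map (fun q => (q.1, q.2.items))))

-- ===== PORT B =====
def initialize_trio_alt (a : List String) (b : List String) : List (Int × List (Int × List (Int × Int))) :=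
  let pairs : List (Int × Int) :=
    (PySem.List.pyRange 0 (a.length : Int)).foldl (fun acc i =>
      acc ++ [(PySem.Str.len (PySem.List.pyGetD a i ""), PySem.Str.len (PySem.List.pyGetD b i ""))]) []
  let m : Int := (PySem.List.max? (pairs.map (fun p => p.1)) (fun y => y)).getD 0
  let x : PySem.Dict Int (PySem.Dict Int (PySem.Dict Int Int)) :=
    (PySem.List.pyRange 1 (m + 1)).foldl (fun x j =>
      let inner := pairs.foldl (fun inner p =>
        if p.1 ≥ j then
          let inner := if inner.contains p.1 then inner else inner.insert p.1 PySem.Dict.empty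
          inner.insert p.1 ((inner.getD p.1 PySem.Dict.empty).insert p.2 0)
        else inner) PySem.Dict.empty
      x.insert j inner) PySem.Dict.empty
  x.items.map (fun p => (p.1, p.2.items.map (fun q => (q.1, q.2.items))))


-- ===== PRECONDITION & SPEC =====
-- Pre_ excludes exactly the inputs on which A raises IndexError (b shorter than a, so b[i] fails).
def Pre_initialize_trio (a : List String) (b : List String) : Prop := a.length ≤ b.length
instance (a : List String) (b : List String) : Decidable (Pre_initialize_trio a b) := by unfold Pre_initialize_trio; infer_instance
def pvWitness_initialize_trio : List String × List String := (["ab", "c"], ["xyz", "", "q"])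

def Spec_initialize_trio (a : List String) (b : List String) (out : List (Int × List (Int × List (Int × Int)))) : Prop := out = initialize_trio_alt a b
instance (a : List String) (b : List String) (out : List (Int × List (Int × List (Int × Int)))) : Decidable (Spec_initialize_trio a b out) := by unfold Spec_initialize_trio; infer_instance

-- ===== CLAIM (what is proved, stated in full; the proofs are below) =====
def Claim_equal_initialize_trio : Prop := ∀ (a : List String) (b : List String), Dom_initialize_trio a b → Pre_initialize_trio a b → Spec_initialize_trio a b (initialize_trio a b)

-- ===== LEMMAS AND PROOFS =====

def pvDictR (M : Int) (g : Int → PySem.Dict Int (PySem.Dict Int Int)) :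
    PySem.Dict Int (PySem.Dict Int (PySem.Dict Int Int)) :=
  PySem.Dict.mk ((PySem.List.pyRange 1 (M + 1)).map (fun j => (j, g j)))

lemma pvDictR_congr (M : Int) (g g' : Int → PySem.Dict Int (PySem.Dict Int Int))
    (h : ∀ j, 1 ≤ j → j ≤ M → g j = g' j) : pvDictR M g = pvDictR M g' := by
  unfold pvDictR
  congr 1
  apply List.map_congr_left
  intro j hj
  rcases PySem.List.mem_pyRange_one.mp hj with ⟨h1, h2⟩
  rw [h j h1 (by omega)]

lemma pvDictR_contains (M j : Int) (g : Int → PySem.Dict Int (PySem.Dict Int Int)) :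
    (pvDictR M g).contains j = true ↔ 1 ≤ j ∧ j ≤ M := by
  simp only [pvDictR, PySem.Dict.contains_mk, List.any_map, List.any_eq_true,
    Function.comp, beq_iff_eq, PySem.List.mem_pyRange_one]
  constructor
  · rintro ⟨x, ⟨hx1, hx2⟩, rfl⟩; omega
  · rintro ⟨h1, h2⟩; exact ⟨j, ⟨h1, by omega⟩, rfl⟩

lemma pvDictR_keys_nodup (M : Int) (g : Int → PySem.Dict Int (PySem.Dict Int Int)) :
    (pvDictR M g).keys.Nodup := by
  simpa [pvDictR, PySem.Dict.keys_mk, Function.comp_def] using PySem.List.nodup_pyRange_one 1 (M + 1)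

lemma pvDictR_getD (M j : Int) (g : Int → PySem.Dict Int (PySem.Dict Int Int))
    (h1 : 1 ≤ j) (h2 : j ≤ M) (d0 : PySem.Dict Int (PySem.Dict Int Int)) :
    (pvDictR M g).getD j d0 = g j := by
  apply PySem.Dict.getD_of_get?_eq_some
  apply PySem.Dict.get?_of_mem_items
  · show (j, g j) ∈ (PySem.List.pyRange 1 (M + 1)).map (fun j => (j, g j))
    exact List.mem_map.mpr ⟨j, PySem.List.mem_pyRange_one.mpr ⟨h1, by omega⟩, rfl⟩
  · exact pvDictR_keys_nodup M g

lemma pvDictR_insert_mem (M k : Int) (g : Int → PySem.Dict Int (PySem.Dict Int Int))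
    (h1 : 1 ≤ k) (h2 : k ≤ M) (v : PySem.Dict Int (PySem.Dict Int Int)) :
    (pvDictR M g).insert k v = pvDictR M (fun j => if j = k then v else g j) := by
  apply PySem.Dict.ext
  rw [PySem.Dict.items_insert_of_contains _ _ ((pvDictR_contains M k g).mpr ⟨h1, h2⟩)]
  show ((PySem.List.pyRange 1 (M + 1)).map (fun j => (j, g j))).map _ = _
  rw [List.map_map]
  apply List.map_congr_left
  intro j hj
  by_cases hk : j = k
  · subst hk; simp
  · simp [Function.comp, hk]

lemma pvDictR_insert_fresh (M : Int) (g : Int → PySem.Dict Int (PySem.Dict Int Int))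
    (hM : 0 ≤ M) (v : PySem.Dict Int (PySem.Dict Int Int)) :
    (pvDictR M g).insert (M + 1) v = pvDictR (M + 1) (fun j => if j = M + 1 then v else g j) := by
  have hc : (pvDictR M g).contains (M + 1) = false := by
    cases hcb : (pvDictR M g).contains (M + 1) with
    | false => rfl
    | true => exact absurd ((pvDictR_contains M (M + 1) g).mp hcb) (by omega)
  apply PySem.Dict.ext
  rw [PySem.Dict.items_insert_of_not_contains _ _ hc]
  show ((PySem.List.pyRange 1 (M + 1)).map (fun j => (j, g j))) ++ _
      = (PySem.List.pyRange 1 (M + 1 + 1)).map _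
  rw [PySem.List.pyRange_one_succ_right (by omega : (1:Int) ≤ M + 1), List.map_append]
  congr 1
  · apply List.map_congr_left
    intro j hj
    rcases PySem.List.mem_pyRange_one.mp hj with ⟨hj1, hj2⟩
    simp [show ¬ j = M + 1 by omega]
  · simp

def pvStep2 (d : PySem.Dict Int (PySem.Dict Int Int)) (le lf : Int) : PySem.Dict Int (PySem.Dict Int Int) :=
  let d := if d.contains le then d else d.insert le PySem.Dict.empty
  d.insert le ((d.getD le PySem.Dict.empty).insert lf 0)

def pvBodyA (le lf : Int) (x : PySem.Dict Int (PySem.Dict Int (PySem.Dict Int Int))) (j : Int) :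
    PySem.Dict Int (PySem.Dict Int (PySem.Dict Int Int)) :=
  let x := if x.contains j then x else x.insert j PySem.Dict.empty
  x.insert j (pvStep2 (x.getD j PySem.Dict.empty) le lf)

lemma pvPhase (le lf : Int) (t : Int) (ht0 : 0 ≤ t) :
    t ≤ le → ∀ (M : Int) (g : Int → PySem.Dict Int (PySem.Dict Int Int)), 0 ≤ M →
      (∀ j, M < j → g j = PySem.Dict.empty) →
      (PySem.List.pyRange 1 (t + 1)).foldl (pvBodyA le lf) (pvDictR M g) =
        pvDictR (max M t) (fun j => if j ≤ t then pvStep2 (g j) le lf else g j) := by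
  induction t, ht0 using Int.le_induction with
  | base =>
    intro _ M g hM hg
    rw [PySem.List.pyRange_one_eq_nil (by omega)]
    simp only [List.foldl_nil]
    rw [show max M 0 = M by omega]
    apply pvDictR_congr
    intro j h1 h2
    rw [if_neg (by omega)]
  | succ t ht IH =>
    intro hle M g hM hg
    have hle' : t ≤ le := by omega
    rw [PySem.List.pyRange_one_succ_right (by omega : (1:Int) ≤ t + 1), List.foldl_append,
      IH hle' M g hM hg]
    simp only [List.foldl_cons, List.foldl_nil]
    by_cases hMt : t + 1 ≤ M
    · -- the key t+1 already exists
      have hmax1 : max M t = M := by omega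
      have hc : (pvDictR (max M t) (fun j => if j ≤ t then pvStep2 (g j) le lf else g j)).contains (t + 1) = true :=
        (pvDictR_contains _ _ _).mpr ⟨by omega, by omega⟩
      simp only [pvBodyA, hc, if_true]
      rw [pvDictR_getD _ _ _ (by omega) (by omega), if_neg (by omega : ¬ t + 1 ≤ t)]
      rw [pvDictR_insert_mem _ _ _ (by omega) (by omega)]
      rw [show max M (t + 1) = max M t by omega]
      apply pvDictR_congr
      intro j h1 h2
      by_cases hj : j = t + 1
      · subst hj; rw [if_pos rfl, if_pos (by omega)]
      · rw [if_neg hj]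
        by_cases hjt : j ≤ t
        · rw [if_pos hjt, if_pos (by omega)]
        · rw [if_neg hjt, if_neg (by omega)]
    · -- fresh key t+1 is appended
      have hmax1 : max M t = t := by omega
      have hc : (pvDictR (max M t) (fun j => if j ≤ t then pvStep2 (g j) le lf else g j)).contains (t + 1) = false := by
        cases hcb : (pvDictR (max M t) (fun j => if j ≤ t then pvStep2 (g j) le lf else g j)).contains (t + 1) with
        | false => rfl
        | true => exact absurd ((pvDictR_contains _ _ _).mp hcb) (by omega)
      simp only [pvBodyA, hc, if_false, Bool.false_eq_true]
      rw [hmax1, pvDictR_insert_fresh _ _ (by omega)]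
      rw [pvDictR_getD _ _ _ (by omega) (by omega), if_pos rfl]
      rw [pvDictR_insert_mem _ _ _ (by omega) (by omega)]
      rw [show max M (t + 1) = t + 1 by omega]
      apply pvDictR_congr
      intro j h1 h2
      by_cases hj : j = t + 1
      · subst hj
        rw [if_pos rfl, if_pos (by omega), hg _ (by omega)]
      · rw [if_neg hj, if_neg hj]
        by_cases hjt : j ≤ t
        · rw [if_pos hjt, if_pos (by omega)]
        · rw [if_neg hjt, if_neg (by omega)]

lemma pvOuter (ps : List (Int × Int)) (hps : ∀ p ∈ ps, 0 ≤ p.1) :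
    ∀ (M : Int) (g : Int → PySem.Dict Int (PySem.Dict Int Int)), 0 ≤ M →
      (∀ j, M < j → g j = PySem.Dict.empty) →
      ps.foldl (fun x p => (PySem.List.pyRange 1 (p.1 + 1)).foldl (pvBodyA p.1 p.2) x) (pvDictR M g) =
        pvDictR (ps.foldl (fun m p => max m p.1) M)
          (fun j => ps.foldl (fun d p => if j ≤ p.1 then pvStep2 d p.1 p.2 else d) (g j)) := by
  induction ps with
  | nil => intro M g _ _; rfl
  | cons p ps IH =>
    intro M g hM hg
    have hp0 : 0 ≤ p.1 := hps p (by simp)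
    simp only [List.foldl_cons]
    rw [pvPhase p.1 p.2 p.1 hp0 le_rfl M g hM hg]
    rw [IH (fun q hq => hps q (by simp [hq])) (max M p.1)
      (fun j => if j ≤ p.1 then pvStep2 (g j) p.1 p.2 else g j) (by omega)
      (fun j hj => by simp only []; rw [if_neg (by omega), hg _ (by omega)])]

lemma pvFoldlRangeZipAux {γ : Type} (F : γ → String → String → γ) :
    ∀ (a b : List String), a.length ≤ b.length → ∀ (init : γ),
      (List.range a.length).foldl (fun acc k => F acc (a.getD k "") (b.getD k "")) init =
        (a.zip b).foldl (fun acc p => F acc p.1 p.2) init := by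
  intro a
  induction a with
  | nil => intro b _ init; simp
  | cons x xs IH =>
    intro b hlen init
    cases b with
    | nil => simp at hlen
    | cons y ys =>
      rw [List.length_cons, List.range_succ_eq_map, List.foldl_cons, List.foldl_map]
      simp only [List.getD_cons_zero, List.getD_cons_succ, List.zip_cons_cons, List.foldl_cons]
      exact IH ys (by simpa using hlen) (F init x y)

lemma pvFoldlRangeZip {γ : Type} (F : γ → String → String → γ) (a b : List String)
    (hlen : a.length ≤ b.length) (init : γ) :
    (PySem.List.pyRange 0 (a.length : Int)).foldl
        (fun acc i => F acc (PySem.List.pyGetD a i "") (PySem.List.pyGetD b i "")) init =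
      (a.zip b).foldl (fun acc p => F acc p.1 p.2) init := by
  rw [PySem.List.pyRange_zero_natCast, List.foldl_map]
  simp only [PySem.List.pyGetD_natCast]
  exact pvFoldlRangeZipAux F a b hlen init

lemma pvMaxEq (ps : List (Int × Int)) (h : ∀ p ∈ ps, 0 ≤ p.1) :
    ((PySem.List.max? (ps.map (fun p => p.1)) (fun y => y)).getD 0) =
      ps.foldl (fun m p => max m p.1) 0 := by
  cases ps with
  | nil => simp [show PySem.List.max? ([] : List Int) (fun y => y) = none from
      (PySem.List.max?_eq_none_iff _ _).mpr rfl]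
  | cons p ps =>
    rw [List.map_cons, PySem.List.max?_id_cons, Option.getD_some, List.foldl_cons,
      List.foldl_map, max_eq_right (h p (by simp))]

lemma pvFoldlAppendMap {α β : Type} (h : α → β) (l : List α) :
    ∀ acc : List β, l.foldl (fun acc x => acc ++ [h x]) acc = acc ++ l.map h := by
  induction l with
  | nil => simp
  | cons x xs IH => intro acc; simp [IH]

lemma pvDictR_zero : pvDictR 0 (fun _ => PySem.Dict.empty) = PySem.Dict.empty := by
  apply PySem.Dict.ext
  unfold pvDictR
  rw [PySem.List.pyRange_one_eq_nil (by omega : (0:Int) + 1 ≤ 1)]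
  rfl

lemma pvEnumFold (le lf : Int) (cs : List Char) (hle : le = (cs.length : Int))
    (x0 : PySem.Dict Int (PySem.Dict Int (PySem.Dict Int Int))) :
    (PySem.List.enumerate cs 1).foldl (fun x jE => pvBodyA le lf x jE.1) x0 =
      (PySem.List.pyRange 1 (le + 1)).foldl (pvBodyA le lf) x0 := by
  rw [show (PySem.List.enumerate cs 1).foldl (fun x jE => pvBodyA le lf x jE.1) x0
        = ((PySem.List.enumerate cs 1).map (fun p => p.1)).foldl (pvBodyA le lf) x0 from
      (List.foldl_map).symm,
    PySem.List.map_fst_enumerate, hle, add_comm (1 : Int)]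

def pvPairs (a b : List String) : List (Int × Int) :=
  (a.zip b).map (fun q => (PySem.Str.len q.1, PySem.Str.len q.2))

def pvInner (ps : List (Int × Int)) (j : Int) : PySem.Dict Int (PySem.Dict Int Int) :=
  ps.foldl (fun d p => if j ≤ p.1 then pvStep2 d p.1 p.2 else d) PySem.Dict.empty

def pvM (ps : List (Int × Int)) : Int := ps.foldl (fun m p => max m p.1) 0

lemma pvPairs_nonneg (a b : List String) : ∀ p ∈ pvPairs a b, 0 ≤ p.1 := by
  intro p hp
  rcases List.mem_map.mp hp with ⟨q, _, rfl⟩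
  simp [PySem.Str.len_eq]

lemma pvA_eq (a b : List String) (hlen : a.length ≤ b.length) :
    initialize_trio a b =
      (pvDictR (pvM (pvPairs a b)) (fun j => pvInner (pvPairs a b) j)).items.map
        (fun p => (p.1, p.2.items.map (fun q => (q.1, q.2.items)))) := by
  have hx := pvFoldlRangeZip
    (F := fun acc e f => (PySem.List.enumerate e.toList 1).foldl
      (fun x jE => pvBodyA (PySem.Str.len e) (PySem.Str.len f) x jE.1) acc)
    a b hlen PySem.Dict.empty
  have hF : (fun (acc : PySem.Dict Int (PySem.Dict Int (PySem.Dict Int Int))) (p : String × String) =>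
        (PySem.List.enumerate p.1.toList 1).foldl
          (fun x jE => pvBodyA (PySem.Str.len p.1) (PySem.Str.len p.2) x jE.1) acc)
      = fun acc p => (PySem.List.pyRange 1 (PySem.Str.len p.1 + 1)).foldl
          (pvBodyA (PySem.Str.len p.1) (PySem.Str.len p.2)) acc := by
    funext acc p
    exact pvEnumFold _ _ _ (PySem.Str.len_eq p.1) acc
  have hzip : (a.zip b).foldl (fun acc p => (PySem.List.pyRange 1 (PySem.Str.len p.1 + 1)).foldl
        (pvBodyA (PySem.Str.len p.1) (PySem.Str.len p.2)) acc) PySem.Dict.empty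
      = (pvPairs a b).foldl
          (fun x p => (PySem.List.pyRange 1 (p.1 + 1)).foldl (pvBodyA p.1 p.2) x) PySem.Dict.empty := by
    exact (List.foldl_map (f := fun (q : String × String) => (PySem.Str.len q.1, PySem.Str.len q.2))
      (g := fun x p => (PySem.List.pyRange 1 (p.1 + 1)).foldl (pvBodyA p.1 p.2) x)).symm
  have houter := pvOuter (pvPairs a b) (pvPairs_nonneg a b) 0 (fun _ => PySem.Dict.empty)
    le_rfl (fun _ _ => rfl)
  calc initialize_trio a b
      = ((PySem.List.pyRange 0 (a.length : Int)).foldl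
          (fun acc i => (PySem.List.enumerate (PySem.List.pyGetD a i "").toList 1).foldl
            (fun x jE => pvBodyA (PySem.Str.len (PySem.List.pyGetD a i ""))
              (PySem.Str.len (PySem.List.pyGetD b i "")) x jE.1) acc)
          PySem.Dict.empty).items.map
            (fun p => (p.1, p.2.items.map (fun q => (q.1, q.2.items)))) := rfl
    _ = _ := by
      rw [hx, hF, hzip, ← pvDictR_zero, houter]
      rfl

lemma pvB_eq (a b : List String) (hlen : a.length ≤ b.length) :
    initialize_trio_alt a b =
      (pvDictR (pvM (pvPairs a b)) (fun j => pvInner (pvPairs a b) j)).items.map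
        (fun p => (p.1, p.2.items.map (fun q => (q.1, q.2.items)))) := by
  have hpairs : (PySem.List.pyRange 0 (a.length : Int)).foldl (fun acc i =>
        acc ++ [(PySem.Str.len (PySem.List.pyGetD a i ""), PySem.Str.len (PySem.List.pyGetD b i ""))]) []
      = pvPairs a b := by
    refine (pvFoldlRangeZip (F := fun acc e f => acc ++ [(PySem.Str.len e, PySem.Str.len f)])
      a b hlen []).trans ?_
    exact (pvFoldlAppendMap (fun (q : String × String) => (PySem.Str.len q.1, PySem.Str.len q.2))
      (a.zip b) []).trans (List.nil_append _)
  have hstart : initialize_trio_alt a b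
      = (fun pairs : List (Int × Int) =>
          ((PySem.List.pyRange 1 (((PySem.List.max? (pairs.map (fun p => p.1)) (fun y => y)).getD 0) + 1)).foldl
            (fun x j => x.insert j (pvInner pairs j)) PySem.Dict.empty).items.map
              (fun p => (p.1, p.2.items.map (fun q => (q.1, q.2.items)))))
          ((PySem.List.pyRange 0 (a.length : Int)).foldl (fun acc i =>
            acc ++ [(PySem.Str.len (PySem.List.pyGetD a i ""), PySem.Str.len (PySem.List.pyGetD b i ""))]) []) := rfl
  rw [hstart, hpairs]
  simp only []
  rw [pvMaxEq (pvPairs a b) (pvPairs_nonneg a b),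
    show (List.foldl (fun m p => max m p.1) 0 (pvPairs a b)) = pvM (pvPairs a b) from rfl]
  have hdict : (PySem.List.pyRange 1 (pvM (pvPairs a b) + 1)).foldl
        (fun x j => x.insert j (pvInner (pvPairs a b) j)) PySem.Dict.empty
      = pvDictR (pvM (pvPairs a b)) (fun j => pvInner (pvPairs a b) j) := by
    apply PySem.Dict.ext
    have hitems := PySem.Dict.items_foldl_insert_fresh
      (l := PySem.List.pyRange 1 (pvM (pvPairs a b) + 1)) (k := fun j => j)
      (v := fun j => pvInner (pvPairs a b) j) (d := PySem.Dict.empty)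
      (fun a _ => PySem.Dict.contains_empty a)
      (by simpa using PySem.List.nodup_pyRange_one 1 (pvM (pvPairs a b) + 1))
    exact hitems.trans (List.nil_append _)
  rw [hdict]

-- ===== VERDICT (by name: the statement is the Claim_ definition above) =====
theorem initialize_trio_spec : Claim_equal_initialize_trio := by
  intro a b _ hpre
  unfold Spec_initialize_trio
  rw [pvA_eq a b hpre, pvB_eq a b hpre]
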